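-- pv_equiv track=rewrite | github.com/KimDaeUng/py_algo | 개인문제/Programmers_Basic/크레인-인형뽑기-게임.py | solution
-- ===== SOURCE A (Python) =====
-- def solution(board, moves):
--     answer = 0
--     rotated_board = list(map(lambda x:
--                         [i for i in x if i != 0][::-1],
--                         zip(*board)))
--     stack = []
--     for i in moves:
--         if len(rotated_board[i - 1]) != 0:
--             stack.append(rotated_board[i - 1].pop())
--         if len(stack) >= 2:
--             if stack[-2] == stack[-1]:
--                 del stack[-2], stack[-1]
--                 answer += 2
--
--     return answer
-- ===== SOURCE B (Python) =====
-- def solution(board, moves):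
--     # Simpler: keep one downward pointer per full column into the original board
--     # (no precomputed reversed column lists); never mutates board.
--     ncols = min(map(len, board)) if board else 0
--     tops = [0] * ncols
--     stack = []
--     answer = 0
--     for m in moves:
--         c = m - 1
--         r = tops[c]
--         while r < len(board) and board[r][c] == 0:
--             r += 1
--         if r < len(board):
--             stack.append(board[r][c])
--             tops[c] = r + 1
--             if len(stack) >= 2 and stack[-1] == stack[-2]:
--                 stack.pop(); stack.pop()
--                 answer += 2
--         else:
--             tops[c] = r
--     return answer
-- ===== Notes on version B (the rewrite author's own statement) =====
-- stated objective: simpler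
-- what changed: B drops A's zip-transpose/filter/reverse precomputation entirely and instead keeps one downward pointer per column into the untouched board, scanning past zeros on demand and checking the stack only after a push.
-- outside the precondition, e.g. on solution([[5, 5, 7], [0, 0]], [1, 0]): A returns 2, B returns 0
import Mathlib
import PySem

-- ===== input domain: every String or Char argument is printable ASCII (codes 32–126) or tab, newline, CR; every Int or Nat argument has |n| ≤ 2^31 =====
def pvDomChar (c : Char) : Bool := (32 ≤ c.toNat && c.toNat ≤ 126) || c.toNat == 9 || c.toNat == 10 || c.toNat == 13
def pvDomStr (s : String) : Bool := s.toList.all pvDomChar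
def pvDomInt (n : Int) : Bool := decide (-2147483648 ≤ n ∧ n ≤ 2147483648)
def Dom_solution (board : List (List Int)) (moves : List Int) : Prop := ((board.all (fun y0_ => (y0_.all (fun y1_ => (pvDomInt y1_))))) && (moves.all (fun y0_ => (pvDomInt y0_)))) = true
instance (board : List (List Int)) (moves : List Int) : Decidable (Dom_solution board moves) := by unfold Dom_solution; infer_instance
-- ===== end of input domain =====

-- Crane doll game. B replaces A's precomputed reversed column lists by one downward
-- pointer per column into the untouched board (return value only; A's Python mutates
-- its local rotated lists, neither version mutates the arguments).

-- ===== PORT A =====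

-- zip(*board): co-iterate all rows, stopping at the shortest; fuel = length of the first row
-- (an upper bound on the number of zip steps, since zip stops at the shortest row).
def zipAux : Nat → List (List Int) → List (List Int)
  | 0, _ => []
  | n + 1, rows =>
    if rows ≠ [] ∧ ∀ r ∈ rows, r ≠ ([] : List Int) then
      (rows.map List.headI) :: zipAux n (rows.map List.tail)
    else []

def zipT (rows : List (List Int)) : List (List Int) := zipAux rows.headI.length rows

-- one iteration of A's for-loop; state = (answer, rotated_board, stack), stack head = top
def stepA (st : Int × List (List Int) × List Int) (m : Int) : Int × List (List Int) × List Int :=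
  match st with
  | (ans, rot, stk) =>
    match PySem.List.pyGet? rot (m - 1) with
    | none => (ans, rot, stk)          -- IndexError in Python: outside Pre_
    | some col =>
      let rot' := if col ≠ [] then PySem.List.pySetD rot (m - 1) col.dropLast else rot
      let stk' := if col ≠ [] then col.getLastD 0 :: stk else stk
      match stk' with
      | a :: b :: rest => if b == a then (ans + 2, rot', rest) else (ans, rot', stk')
      | _ => (ans, rot', stk')

def solution (board : List (List Int)) (moves : List Int) : Int :=
  let rot := (zipT board).map (fun col => (col.filter (fun i => i != 0)).reverse)
  (moves.foldl stepA (0, rot, [])).1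

-- ===== PORT B =====

-- ncols = min(map(len, board)) if board else 0  (min of the row lengths; value only)
def minColsB (board : List (List Int)) : Nat :=
  match board with
  | [] => 0
  | r :: rs => rs.foldl (fun a row => min a row.length) r.length

-- while r < len(board) and board[r][c] == 0: r += 1
def scanB (board : List (List Int)) (c : Int) (r : Nat) : Nat :=
  if h : r < board.length ∧ PySem.List.pyGetD (board.getD r []) c 0 = 0 then
    scanB board c (r + 1)
  else r
termination_by board.length - r
decreasing_by omega

-- one iteration of B's for-loop; state = (answer, tops, stack), stack head = top
def stepB (board : List (List Int)) (st : Int × List Nat × List Int) (m : Int) :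
    Int × List Nat × List Int :=
  match st with
  | (ans, tops, stk) =>
    match PySem.List.pyGet? tops (m - 1) with
    | none => (ans, tops, stk)         -- IndexError in Python: outside Pre_
    | some p =>
      let r := scanB board (m - 1) p
      if r < board.length then
        let v := PySem.List.pyGetD (board.getD r []) (m - 1) 0
        let tops' := PySem.List.pySetD tops (m - 1) (r + 1)
        match v :: stk with
        | a :: b :: rest => if a == b then (ans + 2, tops', rest) else (ans, tops', v :: stk)
        | _ => (ans, tops', v :: stk)
      else (ans, PySem.List.pySetD tops (m - 1) r, stk)

def solution_alt (board : List (List Int)) (moves : List Int) : Int :=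
  (moves.foldl (stepB board) (0, List.replicate (minColsB board) 0, [])).1

-- ===== PRECONDITION & SPEC =====
-- Pre_ excludes moves whose column index is out of range even after Python's negative
-- wraparound (there A raises IndexError), and non-positive moves on boards whose rows
-- have unequal lengths, a corner where A's wraparound into the zip-truncated columns
-- and B's per-row wraparound are both accidental and disagree.
def Pre_solution (board : List (List Int)) (moves : List Int) : Prop :=
  ∀ m ∈ moves, (1 ≤ m ∧ m ≤ (minColsB board : Int)) ∨
    (m ≤ 0 ∧ 1 ≤ m + (minColsB board : Int) ∧ ∀ row ∈ board, row.length = minColsB board)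
instance (board : List (List Int)) (moves : List Int) : Decidable (Pre_solution board moves) := by
  unfold Pre_solution; infer_instance

def pvWitness_solution : List (List Int) × List Int :=
  ([[0, 1], [2, 2]], [1, 2, 2, 1])

def Spec_solution (board : List (List Int)) (moves : List Int) (out : Int) : Prop := out = solution_alt board moves
instance (board : List (List Int)) (moves : List Int) (out : Int) : Decidable (Spec_solution board moves out) := by unfold Spec_solution; infer_instance

-- ===== CLAIM (what is proved, stated in full; the proofs are below) =====
def Claim_equal_solution : Prop := ∀ (board : List (List Int)) (moves : List Int), Dom_solution board moves → Pre_solution board moves → Spec_solution board moves (solution board moves)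

-- ===== LEMMAS AND PROOFS =====

-- column c of the board, read top to bottom (out-of-range entries never reached under Pre_)
def colL (board : List (List Int)) (c : Nat) : List Int := board.map (fun row => row.getD c 0)

lemma zipAux_getD (n : Nat) : ∀ (rows : List (List Int)) (c : Nat),
    c < (zipAux n rows).length → (zipAux n rows).getD c [] = rows.map (fun r => r.getD c 0) := by
  induction n with
  | zero => intro rows c h; simp [zipAux] at h
  | succ n ih =>
    intro rows c h
    rw [zipAux] at h ⊢
    by_cases hcond : rows ≠ [] ∧ ∀ r ∈ rows, r ≠ ([] : List Int)
    · rw [if_pos hcond] at h ⊢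
      cases c with
      | zero =>
        simp only [List.getD_cons_zero]
        exact List.map_congr_left (fun r _ => by cases r <;> rfl)
      | succ c =>
        simp only [List.getD_cons_succ]
        rw [ih (rows.map List.tail) c (by simp only [List.length_cons] at h; omega), List.map_map]
        exact List.map_congr_left (fun r _ => by cases r <;> rfl)
    · rw [if_neg hcond] at h; simp at h


lemma zipAux_len_ge (n : Nat) : ∀ (rows : List (List Int)) (k : Nat), rows ≠ [] →
    (∀ r ∈ rows, k ≤ r.length) → k ≤ n → k ≤ (zipAux n rows).length := by
  induction n with
  | zero => intro rows k _ _ h; simpa [zipAux] using h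
  | succ n ih =>
    intro rows k hne hk hkn
    cases k with
    | zero => exact Nat.zero_le _
    | succ k =>
      rw [zipAux, if_pos]
      · have := ih (rows.map List.tail) k (by simpa using hne)
          (by intro r hr
              obtain ⟨r0, hr0, rfl⟩ := List.mem_map.mp hr
              have := hk r0 hr0; simp; omega)
          (by omega)
        simp only [List.length_cons]; omega
      · refine ⟨hne, fun r hr => ?_⟩
        have := hk r hr; intro h; subst h; simp at this


lemma zipT_len_ge (board : List (List Int)) (k : Nat) (hne : board ≠ [])
    (hk : ∀ r ∈ board, k ≤ r.length) : k ≤ (zipT board).length := by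
  apply zipAux_len_ge _ _ _ hne hk
  cases board with
  | nil => simp at hne
  | cons h t => exact hk h (by simp)


lemma foldl_min_le_init (rs : List (List Int)) (i : Nat) :
    rs.foldl (fun a row => min a row.length) i ≤ i := by
  induction rs generalizing i with
  | nil => simp
  | cons r rs ih => exact le_trans (ih _) (Nat.min_le_left _ _)

lemma foldl_min_le_mem (rs : List (List Int)) (i : Nat) (r : List Int) (hr : r ∈ rs) :
    rs.foldl (fun a row => min a row.length) i ≤ r.length := by
  induction rs generalizing i with
  | nil => simp at hr
  | cons q rs ih =>
    rcases List.mem_cons.mp hr with h | h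
    · subst h; exact le_trans (foldl_min_le_init rs (min i r.length)) (Nat.min_le_right i r.length)
    · exact ih _ h

lemma le_foldl_min (rs : List (List Int)) (i k : Nat) (hi : k ≤ i)
    (hall : ∀ r ∈ rs, k ≤ r.length) :
    k ≤ rs.foldl (fun a row => min a row.length) i := by
  induction rs generalizing i with
  | nil => simpa
  | cons q rs ih =>
    exact ih _ (Nat.le_min.mpr ⟨hi, hall q (by simp)⟩) (fun r hr => hall r (by simp [hr]))

lemma foldl_min_tail (rs : List (List Int)) (i : Nat) :
    (rs.map List.tail).foldl (fun a row => min a row.length) (i - 1)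
      = rs.foldl (fun a row => min a row.length) i - 1 := by
  induction rs generalizing i with
  | nil => simp
  | cons q rs ih =>
    simp only [List.map_cons, List.foldl_cons, List.length_tail]
    rw [show min (i - 1) (q.length - 1) = min i q.length - 1 by omega]
    exact ih _

lemma minColsB_le_mem (board : List (List Int)) (r : List Int) (hr : r ∈ board) :
    minColsB board ≤ r.length := by
  cases board with
  | nil => simp at hr
  | cons q rs =>
    rcases List.mem_cons.mp hr with h | h
    · subst h; exact foldl_min_le_init _ _
    · exact foldl_min_le_mem _ _ _ h

lemma minColsB_tail (q : List Int) (rs : List (List Int)) :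
    minColsB ((q :: rs).map List.tail) = minColsB (q :: rs) - 1 := by
  simp only [minColsB, List.map_cons, List.length_tail]
  exact foldl_min_tail rs q.length

lemma zipAux_length (n : Nat) : ∀ rows : List (List Int), rows ≠ [] →
    (zipAux n rows).length = min n (minColsB rows) := by
  induction n with
  | zero => intro rows _; simp [zipAux]
  | succ n ih =>
    intro rows hne
    rw [zipAux]
    by_cases hcond : rows ≠ [] ∧ ∀ r ∈ rows, r ≠ ([] : List Int)
    · rw [if_pos hcond]
      cases rows with
      | nil => exact absurd rfl hne
      | cons q rs =>
        have h1 : 1 ≤ minColsB (q :: rs) := by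
          apply le_foldl_min
          · have := hcond.2 q (by simp); cases q <;> simp_all
          · intro r hr
            have := hcond.2 r (by simp [hr]); cases r <;> simp_all
        rw [List.length_cons, ih _ (by simp), minColsB_tail]
        omega
    · rw [if_neg hcond]
      push Not at hcond
      obtain ⟨r, hr, hrnil⟩ := hcond hne
      have := minColsB_le_mem rows r hr
      subst hrnil
      simp at this
      simp [this]

lemma zipT_length (board : List (List Int)) (hne : board ≠ []) :
    (zipT board).length = minColsB board := by
  rw [zipT, zipAux_length _ _ hne]
  cases board with
  | nil => exact absurd rfl hne
  | cons q rs =>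
    have : minColsB (q :: rs) ≤ q.length := foldl_min_le_init rs q.length
    simp only [List.headI]
    omega

lemma pySetD_neg_natCast {α : Type} (xs : List α) (k : Nat) (v : α) (hk : 0 < k)
    (hk' : k ≤ xs.length) :
    PySem.List.pySetD xs (-(k:Int)) v = xs.set (xs.length - k) v := by
  simp only [PySem.List.pySetD, PySem.List.pySet?, PySem.List.pyIdx?]
  rw [if_neg (by omega), if_pos (by omega)]
  simp

lemma getD_set_ne {α : Type} (l : List α) (n c : Nat) (a d : α) (h : c ≠ n) :
    (l.set n a).getD c d = l.getD c d := by
  by_cases hc : c < l.length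
  · rw [List.getD_eq_getElem _ _ (by simpa using hc), List.getD_eq_getElem _ _ hc,
      List.getElem_set_ne (fun he => h he.symm)]
  · rw [List.getD_eq_default _ _ (by simpa using hc), List.getD_eq_default _ _ (by omega)]

lemma colL_length (board : List (List Int)) (c : Nat) : (colL board c).length = board.length := by
  simp [colL]

lemma pyGetD_row (board : List (List Int)) (c : Int) (hc : 0 ≤ c)
    (hrow : ∀ row ∈ board, c < (row.length : Int)) (r : Nat) (hr : r < board.length) :
    PySem.List.pyGetD (board.getD r []) c 0 = (colL board c.toNat).getD r 0 := by
  rw [List.getD_eq_getElem board [] hr]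
  have hmem : board[r] ∈ board := List.getElem_mem hr
  have hlen : c < (board[r].length : Int) := hrow _ hmem
  rw [PySem.List.pyGetD_eq_getElem _ _ hc hlen]
  rw [List.getD_eq_getElem (colL board c.toNat) _ (by rw [colL_length]; exact hr)]
  simp [colL]
  rw [List.getElem?_eq_getElem (by omega : c.toNat < board[r].length)]
  rfl

-- same fact for a negative in-range index on a board whose rows all have length ncols
lemma pyGetD_row_neg (board : List (List Int)) (k : Nat) (hk : 0 < k)
    (hrect : ∀ row ∈ board, row.length = minColsB board) (hkle : k ≤ minColsB board)
    (r : Nat) (hr : r < board.length) :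
    PySem.List.pyGetD (board.getD r []) (-(k:Int)) 0
      = (colL board (minColsB board - k)).getD r 0 := by
  rw [List.getD_eq_getElem board [] hr]
  have hmem : board[r] ∈ board := List.getElem_mem hr
  have hlen : board[r].length = minColsB board := hrect _ hmem
  rw [PySem.List.pyGetD_neg_natCast _ _ _ hk (by omega)]
  rw [List.getD_eq_getElem (colL board (minColsB board - k)) _ (by rw [colL_length]; exact hr)]
  simp [colL]
  rw [List.getElem?_eq_getElem (by omega : minColsB board - k < board[r].length)]
  rw [← List.getD_eq_getElem board[r] 0 (by omega : board[r].length - k < board[r].length),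
    show board[r].length - k = minColsB board - k from by omega]
  rw [List.getD_eq_getElem _ _ (by omega)]
  rfl

lemma scanB_spec (board : List (List Int)) (c : Int) (cN : Nat)
    (hval : ∀ r, r < board.length →
      PySem.List.pyGetD (board.getD r []) c 0 = (colL board cN).getD r 0) :
    ∀ p : Nat, p ≤ board.length →
      scanB board c p ≤ board.length ∧
      ((colL board cN).drop p).filter (fun x => x != 0)
        = ((colL board cN).drop (scanB board c p)).filter (fun x => x != 0) ∧
      (scanB board c p < board.length →
        (colL board cN).getD (scanB board c p) 0 ≠ 0) := by
  have main : ∀ n p, p ≤ board.length → board.length - p = n →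
      scanB board c p ≤ board.length ∧
      ((colL board cN).drop p).filter (fun x => x != 0)
        = ((colL board cN).drop (scanB board c p)).filter (fun x => x != 0) ∧
      (scanB board c p < board.length →
        (colL board cN).getD (scanB board c p) 0 ≠ 0) := by
    intro n
    induction n with
    | zero =>
      intro p hp h0
      have hpe : p = board.length := by omega
      rw [scanB, dif_neg (by omega)]
      exact ⟨hp, rfl, by omega⟩
    | succ n ih =>
      intro p hp hn
      by_cases hcond : p < board.length ∧ PySem.List.pyGetD (board.getD p []) c 0 = 0
      · rw [scanB, dif_pos hcond]
        obtain ⟨hplt, hv0⟩ := hcond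
        have h0 : (colL board cN).getD p 0 = 0 := by
          rw [← hval p hplt]; exact hv0
        have hdrop : (colL board cN).drop p
            = (colL board cN).getD p 0 :: (colL board cN).drop (p + 1) := by
          rw [List.getD_eq_getElem _ _ (by rw [colL_length]; exact hplt)]
          exact List.drop_eq_getElem_cons (by rw [colL_length]; exact hplt)
        obtain ⟨h1, h2, h3⟩ := ih (p + 1) (by omega) (by omega)
        refine ⟨h1, ?_, h3⟩
        rw [hdrop, h0, ← h2]
        simp
      · rw [scanB, dif_neg hcond]
        refine ⟨hp, rfl, fun hlt => ?_⟩
        intro h0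
        exact hcond ⟨hlt, by rw [hval p hlt]; exact h0⟩
  intro p hp
  exact main (board.length - p) p hp rfl


-- the per-column relation between A's remaining reversed lists and B's pointers
def ColOk (board : List (List Int)) (rot : List (List Int)) (tops : List Nat) : Prop :=
  ∀ c : Nat, (∀ row ∈ board, c < row.length) →
    rot.getD c [] = (((colL board c).drop (tops.getD c 0)).filter (fun x => x != 0)).reverse
    ∧ tops.getD c 0 ≤ board.length

-- full state relation carried through the fold
def StRel (board : List (List Int)) (a : Int × List (List Int) × List Int)
    (b : Int × List Nat × List Int) : Prop :=
  a.1 = b.1 ∧ a.2.2 = b.2.2 ∧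
  a.2.1.length = (zipT board).length ∧ b.2.1.length = minColsB board ∧
  ColOk board a.2.1 b.2.1 ∧ a.2.2.IsChain (fun x y => ¬ x = y)

lemma step_core (board : List (List Int)) (m : Int) (cN : Nat)
    (ans : Int) (rot : List (List Int)) (tops : List Nat) (stk : List Int)
    (h3 : rot.length = (zipT board).length) (h4 : tops.length = minColsB board)
    (h5 : ColOk board rot tops) (h6 : stk.IsChain (fun x y => ¬ x = y))
    (hcolrow : ∀ row ∈ board, cN < row.length)
    (hrotlen : cN < rot.length) (htoplen : cN < tops.length)
    (hgetA : PySem.List.pyGet? rot (m - 1) = some (rot[cN]'hrotlen))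
    (hgetB : PySem.List.pyGet? tops (m - 1) = some (tops[cN]'htoplen))
    (hsetA : ∀ y, PySem.List.pySetD rot (m - 1) y = rot.set cN y)
    (hsetB : ∀ y, PySem.List.pySetD tops (m - 1) y = tops.set cN y)
    (hval : ∀ r, r < board.length →
      PySem.List.pyGetD (board.getD r []) (m - 1) 0 = (colL board cN).getD r 0) :
    StRel board (stepA (ans, rot, stk) m) (stepB board (ans, tops, stk) m) := by
  have hpd : tops.getD cN 0 = tops[cN] := List.getD_eq_getElem _ _ htoplen
  have hcolok := h5 cN hcolrow
  have hple : tops[cN] ≤ board.length := by rw [← hpd]; exact hcolok.2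
  have hrotc : rot[cN]
      = (((colL board cN).drop tops[cN]).filter (fun x => x != 0)).reverse := by
    rw [← List.getD_eq_getElem rot [] hrotlen, hcolok.1, hpd]
  obtain ⟨hsle, hfilt, hnz⟩ := scanB_spec board (m - 1) cN hval tops[cN] hple
  set s := scanB board (m - 1) tops[cN] with hs_def
  set L := colL board cN with hL
  have hLlen : L.length = board.length := colL_length board cN
  have hcolok_set : ∀ (q : Nat) (hq : q ≤ board.length),
      ColOk board (rot.set cN ((L.drop q).filter (fun x => x != 0)).reverse)
        (tops.set cN q) := by
    intro q hq c' hc'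
    by_cases hcc : c' = cN
    · subst c'
      constructor
      · rw [List.getD_eq_getElem _ _ (by simpa using hrotlen),
          List.getElem_set_self, List.getD_eq_getElem _ _ (by simpa using htoplen),
          List.getElem_set_self]
      · rw [List.getD_eq_getElem _ _ (by simpa using htoplen), List.getElem_set_self]
        exact hq
    · have := h5 c' hc'
      rw [getD_set_ne _ _ _ _ _ hcc, getD_set_ne _ _ _ _ _ hcc]
      exact this
  by_cases hsfound : s < board.length
  · -- a doll is grabbed by both versions
    have hv0 : L.getD s 0 ≠ 0 := hnz hsfound
    set v := L.getD s 0 with hv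
    have hvs : L[s]'(by omega) = v := (List.getD_eq_getElem L 0 (by omega)).symm
    have hkey : (L.drop tops[cN]).filter (fun x => x != 0)
        = v :: (L.drop (s + 1)).filter (fun x => x != 0) := by
      rw [hfilt, List.drop_eq_getElem_cons (by omega : s < L.length), hvs]
      simp [hv0]
    have hcolv : rot[cN] = ((L.drop (s + 1)).filter (fun x => x != 0)).reverse ++ [v] := by
      rw [hrotc, hkey, List.reverse_cons]
    have hvB : PySem.List.pyGetD (board.getD s []) (m - 1) 0 = v := hval s hsfound
    set rotS := rot.set cN ((L.drop (s + 1)).filter (fun x => x != 0)).reverse with hrotS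
    have hcolokA : ColOk board rotS (tops.set cN (s + 1)) := hcolok_set (s + 1) (by omega)
    have hlenA : rotS.length = (zipT board).length := by rw [hrotS, List.length_set, h3]
    have hlenB : (tops.set cN (s + 1)).length = minColsB board := by
      rw [List.length_set, h4]
    rcases stk with _ | ⟨x, rest⟩
    · have hAred : stepA (ans, rot, []) m = (ans, rotS, [v]) := by
        rw [stepA, hgetA]
        simp only [hcolv, hsetA]
        rw [if_pos (by simp), if_pos (by simp)]
        rw [List.getLastD_concat, List.dropLast_concat]
      have hBred : stepB board (ans, tops, []) m = (ans, tops.set cN (s + 1), [v]) := by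
        rw [stepB, hgetB]
        simp only [← hs_def, hvB, hsetB, if_pos hsfound]
      rw [hAred, hBred]
      exact ⟨rfl, rfl, hlenA, hlenB, hcolokA, by simp⟩
    · have hAred : stepA (ans, rot, x :: rest) m =
          if (x == v) = true then (ans + 2, rotS, rest) else (ans, rotS, v :: x :: rest) := by
        rw [stepA, hgetA]
        simp only [hcolv, hsetA]
        rw [if_pos (by simp), if_pos (by simp)]
        rw [List.getLastD_concat, List.dropLast_concat]
      have hBred : stepB board (ans, tops, x :: rest) m =
          if (v == x) = true then (ans + 2, tops.set cN (s + 1), rest)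
          else (ans, tops.set cN (s + 1), v :: x :: rest) := by
        rw [stepB, hgetB]
        simp only [← hs_def, hvB, hsetB, if_pos hsfound]
      rw [hAred, hBred]
      by_cases hxv : x = v
      · subst hxv
        rw [if_pos (by simp), if_pos (by simp)]
        refine ⟨rfl, rfl, hlenA, hlenB, hcolokA, ?_⟩
        cases rest with
        | nil => simp
        | cons y t => exact (List.isChain_cons_cons.mp h6).2
      · rw [if_neg (by simp [hxv]), if_neg (by simp [Ne.symm hxv])]
        refine ⟨rfl, rfl, hlenA, hlenB, hcolokA, ?_⟩
        exact List.isChain_cons_cons.mpr ⟨Ne.symm hxv, h6⟩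
  · -- the column is exhausted: A grabs nothing, B only advances its pointer
    have hseq : s = board.length := by omega
    have hcolnil : rot[cN] = [] := by
      rw [hrotc, hfilt, hseq, ← hLlen, List.drop_length]
      simp
    have hBred : stepB board (ans, tops, stk) m = (ans, tops.set cN s, stk) := by
      rw [stepB, hgetB]
      simp only [← hs_def, hsetB, if_neg hsfound]
    have hAred : stepA (ans, rot, stk) m = (ans, rot, stk) := by
      rw [stepA, hgetA]
      simp only [hcolnil, ne_eq, not_true_eq_false, if_false]
      rcases stk with _ | ⟨x, _ | ⟨y, t⟩⟩
      · rfl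
      · rfl
      · have hxy : ¬ x = y := (List.isChain_cons_cons.mp h6).1
        exact if_neg (by simp [Ne.symm hxy])
    rw [hAred, hBred]
    refine ⟨rfl, rfl, h3, by rw [List.length_set, h4], ?_, h6⟩
    intro c' hc'
    by_cases hcc : c' = cN
    · subst c'
      constructor
      · rw [List.getD_eq_getElem (tops.set cN s) _ (by simpa using htoplen),
          List.getElem_set_self, hcolok.1, hpd, hfilt]
      · rw [List.getD_eq_getElem _ _ (by simpa using htoplen), List.getElem_set_self]; omega
    · rw [getD_set_ne _ _ _ _ _ hcc]
      exact h5 c' hc'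

lemma step_rel (board : List (List Int)) (m : Int)
    (hPm : (1 ≤ m ∧ m ≤ (minColsB board : Int)) ∨
      (m ≤ 0 ∧ 1 ≤ m + (minColsB board : Int) ∧ ∀ row ∈ board, row.length = minColsB board))
    (a b) (h : StRel board a b) : StRel board (stepA a m) (stepB board b m) := by
  obtain ⟨ans, rot, stk⟩ := a
  obtain ⟨ans', tops, stkb⟩ := b
  obtain ⟨h1, h2, h3, h4, h5, h6⟩ := h
  simp only at h1 h2 h3 h4 h5 h6
  subst h1; subst h2
  have hN : 1 ≤ minColsB board := by rcases hPm with ⟨h1, h2⟩ | ⟨h1, h2, h3⟩ <;> omega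
  have hne : board ≠ [] := by
    intro hb; rw [hb] at hN; simp [minColsB] at hN
  have hztl : (zipT board).length = minColsB board := zipT_length board hne
  have hrotN : rot.length = minColsB board := by rw [h3, hztl]
  by_cases hpos : 0 ≤ m - 1
  · -- ordinary move: 1 ≤ m ≤ ncols
    have hmle : m ≤ (minColsB board : Int) := by
      rcases hPm with ⟨h1, h2⟩ | ⟨h1, h2, h3⟩ <;> omega
    have hcast : (m - 1 : Int) = (((m - 1).toNat : Nat) : Int) := by omega
    set cN := (m - 1).toNat with hcN
    have hcNlt : cN < minColsB board := by omega
    have hcolrow : ∀ row ∈ board, cN < row.length := fun row hr => by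
      have := minColsB_le_mem board row hr; omega
    have hrotlen : cN < rot.length := by omega
    have htoplen : cN < tops.length := by omega
    refine step_core board m cN ans rot tops stk h3 h4 h5 h6 hcolrow hrotlen htoplen
      ?_ ?_ ?_ ?_ ?_
    · rw [hcast, PySem.List.pyGet?_natCast, List.getElem?_eq_getElem hrotlen]
    · rw [hcast, PySem.List.pyGet?_natCast, List.getElem?_eq_getElem htoplen]
    · intro y; rw [hcast, PySem.List.pySetD_natCast]
    · intro y; rw [hcast, PySem.List.pySetD_natCast]
    · intro r hr
      exact pyGetD_row board (m - 1) hpos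
        (fun row hrow => by have := hcolrow row hrow; omega) r hr
  · -- wraparound move: m ≤ 0, index counts from the end; rows all have equal length
    obtain ⟨hm0, hmge, hrect⟩ : m ≤ 0 ∧ 1 ≤ m + (minColsB board : Int) ∧
        ∀ row ∈ board, row.length = minColsB board := by
      rcases hPm with ⟨h1, h2⟩ | h <;> [omega; exact h]
    set k := (1 - m).toNat with hk
    have hk0 : 0 < k := by omega
    have hkle : k ≤ minColsB board := by omega
    have hcast : (m - 1 : Int) = -(k : Int) := by omega
    set cN := minColsB board - k with hcN
    have hcolrow : ∀ row ∈ board, cN < row.length := fun row hr => by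
      have := minColsB_le_mem board row hr; omega
    have hrotlen : cN < rot.length := by omega
    have htoplen : cN < tops.length := by omega
    refine step_core board m cN ans rot tops stk h3 h4 h5 h6 hcolrow hrotlen htoplen
      ?_ ?_ ?_ ?_ ?_
    · rw [hcast, PySem.List.pyGet?_neg_natCast rot k hk0 (by omega),
        show rot.length - k = cN from by omega,
        List.getElem?_eq_getElem hrotlen]
    · rw [hcast, PySem.List.pyGet?_neg_natCast tops k hk0 (by omega),
        show tops.length - k = cN from by omega,
        List.getElem?_eq_getElem htoplen]
    · intro y; rw [hcast, pySetD_neg_natCast rot k y hk0 (by omega), hcN, hrotN]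
    · intro y; rw [hcast, pySetD_neg_natCast tops k y hk0 (by omega), hcN, h4]
    · intro r hr
      rw [hcast]
      exact pyGetD_row_neg board k hk0 hrect hkle r hr

lemma fold_rel (board : List (List Int)) (moves : List Int)
    (hpre : Pre_solution board moves) : ∀ a b, StRel board a b →
    StRel board (moves.foldl stepA a) (moves.foldl (stepB board) b) := by
  revert hpre
  induction moves with
  | nil => intro _ a b h; simpa using h
  | cons m ms ih =>
    intro hpre a b h
    simp only [List.foldl_cons]
    exact ih (fun q hq => hpre q (by simp [hq])) _ _ (step_rel board m (hpre m (by simp)) a b h)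

lemma init_rel (board : List (List Int)) :
    StRel board (0, (zipT board).map (fun col => (col.filter (fun i => i != 0)).reverse), [])
      (0, List.replicate (minColsB board) 0, []) := by
  refine ⟨rfl, rfl, by simp, by simp, ?_, by simp⟩
  intro c hc
  have hrep : (List.replicate (minColsB board) (0:Nat)).getD c 0 = 0 := by
    by_cases h : c < minColsB board
    · rw [List.getD_eq_getElem _ _ (by simpa using h)]; simp
    · rw [List.getD_eq_default _ _ (by simpa using h)]
  refine ⟨?_, by rw [hrep]; exact Nat.zero_le _⟩
  rw [hrep, List.drop_zero]
  by_cases hb : board = []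
  · subst hb; rfl
  · have hlen : c + 1 ≤ (zipT board).length := zipT_len_ge board (c + 1) hb hc
    rw [List.getD_eq_getElem _ _ (by simp; omega), List.getElem_map,
      ← List.getD_eq_getElem _ [] (by omega)]
    rw [zipT] at hlen ⊢
    rw [zipAux_getD _ board c (by omega)]
    rfl

-- ===== VERDICT (by name: the statement is the Claim_ definition above) =====
theorem solution_spec : Claim_equal_solution := by
  intro board moves _ hpre
  unfold Spec_solution solution solution_alt
  exact (fold_rel board moves hpre _ _ (init_rel board)).1
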